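-- pv_equiv track=rewrite | github.com/kosirm/resurrexit-3 | parser/languages/italian/customizations.py | _looks_like_italian_chord
-- ===== SOURCE A (Python) =====
-- def _looks_like_italian_chord(word: str) -> bool:
--     """Check if a single word looks like an Italian chord root"""
--     if not word:
--         return False
--
--     # Italian chord roots
--     italian_roots = ['Do', 'Re', 'Mi', 'Fa', 'Sol', 'La', 'Si']
--
--     # Check for basic root
--     for root in italian_roots:
--         if word.startswith(root):
--             remaining = word[len(root):]
--             if not remaining:
--                 return True  # Just the root
--             elif remaining in ['#', 'b', 'm', '7', '9', '6', '4', '2', '11', '13', 'maj7', 'dim', 'aug', 'sus4', 'sus2']: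
--                 return True  # Root with extension
--             elif remaining.startswith('m') and len(remaining) > 1:
--                 # Minor chord with extension like "Rem7"
--                 extension = remaining[1:]
--                 return extension in ['7', '9', '6', '4', '2', '11', '13']
--             elif remaining.startswith('#') or remaining.startswith('b'):
--                 # Accidental chord like "Re#", "Sib"
--                 return len(remaining) <= 2
--
--     return False
-- ===== SOURCE B (Python) =====
-- _ROOTS = {'Do', 'Re', 'Mi', 'Fa', 'Sol', 'La', 'Si'}
-- _SUFFIXES = {'', '#', 'b', 'm', '7', '9', '6', '4', '2', '11', '13',
--              'maj7', 'dim', 'aug', 'sus4', 'sus2',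
--              'm7', 'm9', 'm6', 'm4', 'm2', 'm11', 'm13'}
--
--
-- def _looks_like_italian_chord(word: str) -> bool:
--     """Check if a single word looks like an Italian chord root"""
--     root_len = 3 if word[:3] == 'Sol' else 2
--     if word[:root_len] not in _ROOTS:
--         return False
--     suffix = word[root_len:]
--     return suffix in _SUFFIXES or (len(suffix) == 2 and suffix[0] in '#b')
-- ===== Notes on version B (the rewrite author's own statement) =====
-- stated objective: simpler
-- what changed: B replaces A's loop over the seven roots with a cascade of ordered branches by direct root extraction (take 3 if it is 'Sol', else take 2) followed by a single flat membership test in one precomputed suffix set plus one accidental length check.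
import Mathlib
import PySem

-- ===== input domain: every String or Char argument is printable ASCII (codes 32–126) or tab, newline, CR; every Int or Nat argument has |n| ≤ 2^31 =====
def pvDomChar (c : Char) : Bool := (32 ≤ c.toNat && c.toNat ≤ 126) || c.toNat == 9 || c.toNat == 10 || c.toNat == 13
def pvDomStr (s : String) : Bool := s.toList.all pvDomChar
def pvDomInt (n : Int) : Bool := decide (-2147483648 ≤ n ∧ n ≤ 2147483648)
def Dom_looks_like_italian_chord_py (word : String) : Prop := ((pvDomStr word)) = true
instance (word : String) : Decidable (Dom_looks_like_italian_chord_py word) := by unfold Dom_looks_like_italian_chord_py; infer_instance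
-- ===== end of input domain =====

-- B replaces A's loop over the seven roots with direct root extraction (take 3 if the prefix is
-- "Sol", else take 2) plus one flat membership test in a precomputed suffix set; objective: simpler.
-- Per the PySem convention, string work is ported on the List Char side (string literals appear as
-- their character lists); PySem.Chars.* are the Python-exact primitives.

-- ===== PORT A =====
-- italian_roots = ['Do', 'Re', 'Mi', 'Fa', 'Sol', 'La', 'Si']
def chordRootsA : List (List Char) :=
  [['D','o'], ['R','e'], ['M','i'], ['F','a'], ['S','o','l'], ['L','a'], ['S','i']]

-- ['#', 'b', 'm', '7', '9', '6', '4', '2', '11', '13', 'maj7', 'dim', 'aug', 'sus4', 'sus2']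
def chordExtsA : List (List Char) :=
  [['#'], ['b'], ['m'], ['7'], ['9'], ['6'], ['4'], ['2'], ['1','1'], ['1','3'],
   ['m','a','j','7'], ['d','i','m'], ['a','u','g'], ['s','u','s','4'], ['s','u','s','2']]

-- ['7', '9', '6', '4', '2', '11', '13']
def minorExtsA : List (List Char) :=
  [['7'], ['9'], ['6'], ['4'], ['2'], ['1','1'], ['1','3']]

-- the 'for root in italian_roots' loop of A; falling out of all branches continues the loop
def chordLoopA (w : List Char) : List (List Char) → Bool
  | [] => false
  | root :: rest =>
    if PySem.Chars.startswith w root then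
      let remaining := PySem.Chars.slice w (some (root.length : Int)) none
      if remaining.length = 0 then true
      else if remaining ∈ chordExtsA then true
      else if PySem.Chars.startswith remaining ['m'] && decide (1 < remaining.length) then
        decide (PySem.Chars.slice remaining (some 1) none ∈ minorExtsA)
      else if PySem.Chars.startswith remaining ['#'] || PySem.Chars.startswith remaining ['b'] then
        decide (remaining.length ≤ 2)
      else chordLoopA w rest
    else chordLoopA w rest

def looks_like_italian_chord_py (word : String) : Bool :=
  if PySem.Str.len word = 0 then false
  else chordLoopA word.toList chordRootsA

-- ===== PORT B =====
def chordRootSetB : PySem.Set (List Char) :=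
  PySem.Set.ofList [['D','o'], ['R','e'], ['M','i'], ['F','a'], ['S','o','l'], ['L','a'], ['S','i']]

def chordSuffixSetB : PySem.Set (List Char) :=
  PySem.Set.ofList
    [[], ['#'], ['b'], ['m'], ['7'], ['9'], ['6'], ['4'], ['2'], ['1','1'], ['1','3'],
     ['m','a','j','7'], ['d','i','m'], ['a','u','g'], ['s','u','s','4'], ['s','u','s','2'],
     ['m','7'], ['m','9'], ['m','6'], ['m','4'], ['m','2'], ['m','1','1'], ['m','1','3']]

def looks_like_italian_chord_py_alt (word : String) : Bool :=
  let w := word.toList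
  let rootLen : Int := if PySem.Chars.slice w none (some 3) = ['S','o','l'] then 3 else 2
  if !(PySem.Set.contains chordRootSetB (PySem.Chars.slice w none (some rootLen))) then false
  else
    let suffix := PySem.Chars.slice w (some rootLen) none
    PySem.Set.contains chordSuffixSetB suffix ||
      (decide (suffix.length = 2) &&
        (match PySem.List.pyGet? suffix 0 with
         | some c => PySem.Chars.isIn [c] ['#','b']
         | none => false))

-- ===== PRECONDITION & SPEC =====
def Spec_looks_like_italian_chord_py (word : String) (out : Bool) : Prop := out = looks_like_italian_chord_py_alt word
instance (word : String) (out : Bool) : Decidable (Spec_looks_like_italian_chord_py word out) := by unfold Spec_looks_like_italian_chord_py; infer_instance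

-- ===== CLAIM (what is proved, stated in full; the proofs are below) =====
def Claim_equal_looks_like_italian_chord_py : Prop := ∀ (word : String), Dom_looks_like_italian_chord_py word → Spec_looks_like_italian_chord_py word (looks_like_italian_chord_py word)

-- ===== LEMMAS AND PROOFS =====
set_option maxHeartbeats 3000000

lemma rootB_eq : chordRootSetB = [['D','o'],['R','e'],['M','i'],['F','a'],['S','o','l'],['L','a'],['S','i']] := by decide
lemma sufB_eq : chordSuffixSetB = [[],['#'],['b'],['m'],['7'],['9'],['6'],['4'],['2'],['1','1'],['1','3'],['m','a','j','7'],['d','i','m'],['a','u','g'],['s','u','s','4'],['s','u','s','2'],['m','7'],['m','9'],['m','6'],['m','4'],['m','2'],['m','1','1'],['m','1','3']] := by decide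

lemma isIn_single (c : Char) (l : List Char) : PySem.Chars.isIn [c] l = decide (c ∈ l) := by
  rw [Bool.eq_iff_iff]; simp [PySem.Chars.isIn_iff_infix, List.singleton_infix_iff]

-- B's flat suffix test, as a named function for the proofs
def flatB (r : List Char) : Bool :=
  PySem.Set.contains chordSuffixSetB r ||
    (decide (r.length = 2) && (match PySem.List.pyGet? r 0 with | some c => PySem.Chars.isIn [c] ['#','b'] | none => false))

-- A's branch cascade on the part after the root equals B's flat suffix test
theorem suffix_lemma (r : List Char) (k : Bool) (hk : k = false) :
  (if r.length = 0 then true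
   else if r ∈ chordExtsA then true
   else if PySem.Chars.startswith r ['m'] && decide (1 < r.length) then
     decide (PySem.Chars.slice r (some 1) none ∈ minorExtsA)
   else if PySem.Chars.startswith r ['#'] || PySem.Chars.startswith r ['b'] then
     decide (r.length ≤ 2)
   else k) = flatB r := by
  subst hk
  rw [Bool.eq_iff_iff]
  unfold flatB
  rcases r with _ | ⟨x, _ | ⟨y, _ | ⟨z, t⟩⟩⟩
  · decide
  all_goals
    simp only [chordExtsA, minorExtsA, sufB_eq, PySem.Set.contains, PySem.List.pyGet?,
      PySem.List.pyIdx?, isIn_single]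
    simp [PySem.Chars.startswith_iff, List.cons_prefix_cons, PySem.List.slice_from_one]
  · tauto
  · split_ifs <;> (try subst_vars) <;> (try simp_all) <;> tauto
  · by_cases hx : x = 'm' <;> simp_all [@eq_comm _ 'm']

lemma loop_nomatch (w : List Char) (rl : List (List Char))
    (h : ∀ r ∈ rl, PySem.Chars.startswith w r = false) : chordLoopA w rl = false := by
  induction rl with
  | nil => rfl
  | cons r rs ih =>
    rw [chordLoopA, if_neg (by simp [h r (List.mem_cons_self)])]
    exact ih (fun r hr => h r (List.mem_cons_of_mem _ hr))

lemma loop_cons_nomatch (w root : List Char) (rest : List (List Char))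
    (h : PySem.Chars.startswith w root = false) :
    chordLoopA w (root :: rest) = chordLoopA w rest := by
  rw [chordLoopA, if_neg (by simp [h])]

lemma loop_cons_match (w root : List Char) (rest : List (List Char))
    (h : PySem.Chars.startswith w root = true) (hrest : chordLoopA w rest = false) :
    chordLoopA w (root :: rest) = flatB (PySem.Chars.slice w (some (root.length : Int)) none) := by
  rw [chordLoopA, if_pos (by simp [h])]
  exact suffix_lemma _ _ hrest

lemma sw (x y : Char) (t : List Char) (a b : Char) :
    PySem.Chars.startswith (x :: y :: t) [a, b] = (a == x && b == y) := by
  simp [PySem.Chars.startswith, List.isPrefixOf]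

lemma sliceTake (cs : List Char) (n : Nat) :
    PySem.Chars.slice cs none (some (n : Int)) = cs.take n := by
  simp only [PySem.Chars.slice_eq_listSlice]
  rw [PySem.List.slice_to _ (by positivity)]
  simp
lemma sliceDrop (cs : List Char) (n : Nat) :
    PySem.Chars.slice cs (some (n : Int)) none = cs.drop n := by
  simp only [PySem.Chars.slice_eq_listSlice]
  rw [PySem.List.slice_from _ (by positivity)]
  simp
lemma sliceTake3 (cs : List Char) : PySem.List.slice cs none (some 3) = cs.take 3 := by
  have := sliceTake cs 3; simpa using this
lemma sliceTake2 (cs : List Char) : PySem.List.slice cs none (some 2) = cs.take 2 := by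
  have := sliceTake cs 2; simpa using this
lemma sliceDrop3 (cs : List Char) : PySem.List.slice cs (some 3) none = cs.drop 3 := by
  have := sliceDrop cs 3; simpa using this
lemma sliceDrop2 (cs : List Char) : PySem.List.slice cs (some 2) none = cs.drop 2 := by
  have := sliceDrop cs 2; simpa using this

lemma case_one (x : Char) : chordLoopA [x] chordRootsA = (let rootLen : Int := if PySem.Chars.slice [x] none (some 3) = ['S','o','l'] then 3 else 2
     if !(PySem.Set.contains chordRootSetB (PySem.Chars.slice [x] none (some rootLen))) then false
     else flatB (PySem.Chars.slice [x] (some rootLen) none)) := by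
  rw [loop_nomatch _ _ (by intro r hr; fin_cases hr <;> simp [PySem.Chars.startswith, List.isPrefixOf])]
  simp [PySem.Chars.slice_eq_listSlice, List.length_cons, List.length_nil, Nat.cast_ofNat,
    sliceTake3, sliceTake2, sliceDrop3, sliceDrop2, rootB_eq, PySem.Set.contains,
    List.contains_cons]

lemma case_sol (t2 : List Char) :
    chordLoopA ('S'::'o'::'l'::t2) chordRootsA = (let rootLen : Int := if PySem.Chars.slice ('S'::'o'::'l'::t2) none (some 3) = ['S','o','l'] then 3 else 2
     if !(PySem.Set.contains chordRootSetB (PySem.Chars.slice ('S'::'o'::'l'::t2) none (some rootLen))) then false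
     else flatB (PySem.Chars.slice ('S'::'o'::'l'::t2) (some rootLen) none)) := by
  rw [show chordRootsA = [['D','o'], ['R','e'], ['M','i'], ['F','a'], ['S','o','l'], ['L','a'], ['S','i']] from rfl]
  rw [loop_cons_nomatch ('S'::'o'::'l'::t2) ['D','o'] [['R','e'], ['M','i'], ['F','a'], ['S','o','l'], ['L','a'], ['S','i']] (by simp [sw]),
      loop_cons_nomatch ('S'::'o'::'l'::t2) ['R','e'] [['M','i'], ['F','a'], ['S','o','l'], ['L','a'], ['S','i']] (by simp [sw]),
      loop_cons_nomatch ('S'::'o'::'l'::t2) ['M','i'] [['F','a'], ['S','o','l'], ['L','a'], ['S','i']] (by simp [sw]),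
      loop_cons_nomatch ('S'::'o'::'l'::t2) ['F','a'] [['S','o','l'], ['L','a'], ['S','i']] (by simp [sw]),
      loop_cons_match ('S'::'o'::'l'::t2) ['S','o','l'] [['L','a'], ['S','i']] (by simp [PySem.Chars.startswith, List.isPrefixOf])
        (loop_nomatch _ _ (by intro r hr; fin_cases hr <;> simp [PySem.Chars.startswith, List.isPrefixOf]))]
  simp [PySem.Chars.slice_eq_listSlice, List.length_cons, List.length_nil, Nat.cast_ofNat,
    sliceTake3, sliceTake2, sliceDrop3, sliceDrop2, rootB_eq, PySem.Set.contains,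
    List.contains_cons]

lemma case_Do (t : List Char) :
    chordLoopA ('D' :: 'o' :: t) chordRootsA = (let rootLen : Int := if PySem.Chars.slice ('D' :: 'o' :: t) none (some 3) = ['S','o','l'] then 3 else 2
     if !(PySem.Set.contains chordRootSetB (PySem.Chars.slice ('D' :: 'o' :: t) none (some rootLen))) then false
     else flatB (PySem.Chars.slice ('D' :: 'o' :: t) (some rootLen) none)) := by
  rw [show chordRootsA = [['D','o'], ['R','e'], ['M','i'], ['F','a'], ['S','o','l'], ['L','a'], ['S','i']] from rfl]
  rw [loop_cons_match ('D' :: 'o' :: t) ['D','o'] [['R','e'], ['M','i'], ['F','a'], ['S','o','l'], ['L','a'], ['S','i']] (by simp [sw, PySem.Chars.startswith, List.isPrefixOf])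
        (loop_nomatch _ _ (by intro r hr; fin_cases hr <;> simp [PySem.Chars.startswith, List.isPrefixOf]))]
  simp [PySem.Chars.slice_eq_listSlice, List.length_cons, List.length_nil, Nat.cast_ofNat,
    sliceTake3, sliceTake2, sliceDrop3, sliceDrop2, rootB_eq, PySem.Set.contains,
    List.contains_cons]

lemma case_Re (t : List Char) :
    chordLoopA ('R' :: 'e' :: t) chordRootsA = (let rootLen : Int := if PySem.Chars.slice ('R' :: 'e' :: t) none (some 3) = ['S','o','l'] then 3 else 2
     if !(PySem.Set.contains chordRootSetB (PySem.Chars.slice ('R' :: 'e' :: t) none (some rootLen))) then false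
     else flatB (PySem.Chars.slice ('R' :: 'e' :: t) (some rootLen) none)) := by
  rw [show chordRootsA = [['D','o'], ['R','e'], ['M','i'], ['F','a'], ['S','o','l'], ['L','a'], ['S','i']] from rfl]
  rw [loop_cons_nomatch ('R' :: 'e' :: t) ['D','o'] [['R','e'], ['M','i'], ['F','a'], ['S','o','l'], ['L','a'], ['S','i']] (by simp [sw]),
      loop_cons_match ('R' :: 'e' :: t) ['R','e'] [['M','i'], ['F','a'], ['S','o','l'], ['L','a'], ['S','i']] (by simp [sw, PySem.Chars.startswith, List.isPrefixOf])
        (loop_nomatch _ _ (by intro r hr; fin_cases hr <;> simp [PySem.Chars.startswith, List.isPrefixOf]))]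
  simp [PySem.Chars.slice_eq_listSlice, List.length_cons, List.length_nil, Nat.cast_ofNat,
    sliceTake3, sliceTake2, sliceDrop3, sliceDrop2, rootB_eq, PySem.Set.contains,
    List.contains_cons]

lemma case_Mi (t : List Char) :
    chordLoopA ('M' :: 'i' :: t) chordRootsA = (let rootLen : Int := if PySem.Chars.slice ('M' :: 'i' :: t) none (some 3) = ['S','o','l'] then 3 else 2
     if !(PySem.Set.contains chordRootSetB (PySem.Chars.slice ('M' :: 'i' :: t) none (some rootLen))) then false
     else flatB (PySem.Chars.slice ('M' :: 'i' :: t) (some rootLen) none)) := by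
  rw [show chordRootsA = [['D','o'], ['R','e'], ['M','i'], ['F','a'], ['S','o','l'], ['L','a'], ['S','i']] from rfl]
  rw [loop_cons_nomatch ('M' :: 'i' :: t) ['D','o'] [['R','e'], ['M','i'], ['F','a'], ['S','o','l'], ['L','a'], ['S','i']] (by simp [sw]),
      loop_cons_nomatch ('M' :: 'i' :: t) ['R','e'] [['M','i'], ['F','a'], ['S','o','l'], ['L','a'], ['S','i']] (by simp [sw]),
      loop_cons_match ('M' :: 'i' :: t) ['M','i'] [['F','a'], ['S','o','l'], ['L','a'], ['S','i']] (by simp [sw, PySem.Chars.startswith, List.isPrefixOf])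
        (loop_nomatch _ _ (by intro r hr; fin_cases hr <;> simp [PySem.Chars.startswith, List.isPrefixOf]))]
  simp [PySem.Chars.slice_eq_listSlice, List.length_cons, List.length_nil, Nat.cast_ofNat,
    sliceTake3, sliceTake2, sliceDrop3, sliceDrop2, rootB_eq, PySem.Set.contains,
    List.contains_cons]

lemma case_Fa (t : List Char) :
    chordLoopA ('F' :: 'a' :: t) chordRootsA = (let rootLen : Int := if PySem.Chars.slice ('F' :: 'a' :: t) none (some 3) = ['S','o','l'] then 3 else 2
     if !(PySem.Set.contains chordRootSetB (PySem.Chars.slice ('F' :: 'a' :: t) none (some rootLen))) then false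
     else flatB (PySem.Chars.slice ('F' :: 'a' :: t) (some rootLen) none)) := by
  rw [show chordRootsA = [['D','o'], ['R','e'], ['M','i'], ['F','a'], ['S','o','l'], ['L','a'], ['S','i']] from rfl]
  rw [loop_cons_nomatch ('F' :: 'a' :: t) ['D','o'] [['R','e'], ['M','i'], ['F','a'], ['S','o','l'], ['L','a'], ['S','i']] (by simp [sw]),
      loop_cons_nomatch ('F' :: 'a' :: t) ['R','e'] [['M','i'], ['F','a'], ['S','o','l'], ['L','a'], ['S','i']] (by simp [sw]),
      loop_cons_nomatch ('F' :: 'a' :: t) ['M','i'] [['F','a'], ['S','o','l'], ['L','a'], ['S','i']] (by simp [sw]),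
      loop_cons_match ('F' :: 'a' :: t) ['F','a'] [['S','o','l'], ['L','a'], ['S','i']] (by simp [sw, PySem.Chars.startswith, List.isPrefixOf])
        (loop_nomatch _ _ (by intro r hr; fin_cases hr <;> simp [PySem.Chars.startswith, List.isPrefixOf]))]
  simp [PySem.Chars.slice_eq_listSlice, List.length_cons, List.length_nil, Nat.cast_ofNat,
    sliceTake3, sliceTake2, sliceDrop3, sliceDrop2, rootB_eq, PySem.Set.contains,
    List.contains_cons]

lemma case_La (t : List Char) :
    chordLoopA ('L' :: 'a' :: t) chordRootsA = (let rootLen : Int := if PySem.Chars.slice ('L' :: 'a' :: t) none (some 3) = ['S','o','l'] then 3 else 2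
     if !(PySem.Set.contains chordRootSetB (PySem.Chars.slice ('L' :: 'a' :: t) none (some rootLen))) then false
     else flatB (PySem.Chars.slice ('L' :: 'a' :: t) (some rootLen) none)) := by
  rw [show chordRootsA = [['D','o'], ['R','e'], ['M','i'], ['F','a'], ['S','o','l'], ['L','a'], ['S','i']] from rfl]
  rw [loop_cons_nomatch ('L' :: 'a' :: t) ['D','o'] [['R','e'], ['M','i'], ['F','a'], ['S','o','l'], ['L','a'], ['S','i']] (by simp [sw]),
      loop_cons_nomatch ('L' :: 'a' :: t) ['R','e'] [['M','i'], ['F','a'], ['S','o','l'], ['L','a'], ['S','i']] (by simp [sw]),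
      loop_cons_nomatch ('L' :: 'a' :: t) ['M','i'] [['F','a'], ['S','o','l'], ['L','a'], ['S','i']] (by simp [sw]),
      loop_cons_nomatch ('L' :: 'a' :: t) ['F','a'] [['S','o','l'], ['L','a'], ['S','i']] (by simp [sw]),
      loop_cons_nomatch ('L' :: 'a' :: t) ['S','o','l'] [['L','a'], ['S','i']] (by simp [PySem.Chars.startswith, List.isPrefixOf]),
      loop_cons_match ('L' :: 'a' :: t) ['L','a'] [['S','i']] (by simp [sw, PySem.Chars.startswith, List.isPrefixOf])
        (loop_nomatch _ _ (by intro r hr; fin_cases hr <;> simp [PySem.Chars.startswith, List.isPrefixOf]))]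
  simp [PySem.Chars.slice_eq_listSlice, List.length_cons, List.length_nil, Nat.cast_ofNat,
    sliceTake3, sliceTake2, sliceDrop3, sliceDrop2, rootB_eq, PySem.Set.contains,
    List.contains_cons]

lemma case_Si (t : List Char) :
    chordLoopA ('S' :: 'i' :: t) chordRootsA = (let rootLen : Int := if PySem.Chars.slice ('S' :: 'i' :: t) none (some 3) = ['S','o','l'] then 3 else 2
     if !(PySem.Set.contains chordRootSetB (PySem.Chars.slice ('S' :: 'i' :: t) none (some rootLen))) then false
     else flatB (PySem.Chars.slice ('S' :: 'i' :: t) (some rootLen) none)) := by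
  rw [show chordRootsA = [['D','o'], ['R','e'], ['M','i'], ['F','a'], ['S','o','l'], ['L','a'], ['S','i']] from rfl]
  rw [loop_cons_nomatch ('S' :: 'i' :: t) ['D','o'] [['R','e'], ['M','i'], ['F','a'], ['S','o','l'], ['L','a'], ['S','i']] (by simp [sw]),
      loop_cons_nomatch ('S' :: 'i' :: t) ['R','e'] [['M','i'], ['F','a'], ['S','o','l'], ['L','a'], ['S','i']] (by simp [sw]),
      loop_cons_nomatch ('S' :: 'i' :: t) ['M','i'] [['F','a'], ['S','o','l'], ['L','a'], ['S','i']] (by simp [sw]),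
      loop_cons_nomatch ('S' :: 'i' :: t) ['F','a'] [['S','o','l'], ['L','a'], ['S','i']] (by simp [sw]),
      loop_cons_nomatch ('S' :: 'i' :: t) ['S','o','l'] [['L','a'], ['S','i']] (by simp [PySem.Chars.startswith, List.isPrefixOf]),
      loop_cons_nomatch ('S' :: 'i' :: t) ['L','a'] [['S','i']] (by simp [sw]),
      loop_cons_match ('S' :: 'i' :: t) ['S','i'] [] (by simp [sw, PySem.Chars.startswith, List.isPrefixOf])
        (loop_nomatch _ _ (by intro r hr; fin_cases hr <;> simp [PySem.Chars.startswith, List.isPrefixOf]))]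
  simp [PySem.Chars.slice_eq_listSlice, List.length_cons, List.length_nil, Nat.cast_ofNat,
    sliceTake3, sliceTake2, sliceDrop3, sliceDrop2, rootB_eq, PySem.Set.contains,
    List.contains_cons]

lemma case_none (x y : Char) (t : List Char)
    (hSol : ¬PySem.Chars.startswith (x :: y :: t) ['S','o','l'] = true)
    (hq0 : ¬(x = 'D' ∧ y = 'o')) (hq1 : ¬(x = 'R' ∧ y = 'e')) (hq2 : ¬(x = 'M' ∧ y = 'i'))
    (hq3 : ¬(x = 'F' ∧ y = 'a')) (hq4 : ¬(x = 'L' ∧ y = 'a')) (hq5 : ¬(x = 'S' ∧ y = 'i')) :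
    chordLoopA (x :: y :: t) chordRootsA = (let rootLen : Int := if PySem.Chars.slice (x :: y :: t) none (some 3) = ['S','o','l'] then 3 else 2
     if !(PySem.Set.contains chordRootSetB (PySem.Chars.slice (x :: y :: t) none (some rootLen))) then false
     else flatB (PySem.Chars.slice (x :: y :: t) (some rootLen) none)) := by
  have hnm : chordLoopA (x :: y :: t) chordRootsA = false := by
    apply loop_nomatch
    rw [show chordRootsA = [['D','o'], ['R','e'], ['M','i'], ['F','a'], ['S','o','l'], ['L','a'], ['S','i']] from rfl]
    intro r hr; fin_cases hr
    · simp [sw]; tauto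
    · simp [sw]; tauto
    · simp [sw]; tauto
    · simp [sw]; tauto
    · simp only [Bool.not_eq_true] at hSol; exact hSol
    · simp [sw]; tauto
    · simp [sw]; tauto
  have hS : ¬(x = 'S' ∧ y = 'o' ∧ List.take 1 t = ['l']) := by
    rintro ⟨h1, h2, h3⟩
    apply hSol
    rw [PySem.Chars.startswith_iff]
    subst h1; subst h2
    rcases t with _ | ⟨c, t'⟩
    · simp at h3
    · simp at h3
      subst h3
      simp [List.cons_prefix_cons]
  rw [hnm]
  simp [PySem.Chars.slice_eq_listSlice, List.length_cons, List.length_nil, Nat.cast_ofNat,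
    sliceTake3, sliceTake2, sliceDrop3, sliceDrop2, rootB_eq, PySem.Set.contains,
    List.contains_cons, hS]
  tauto

theorem main_list (w : List Char) :
  (if w.length = 0 then false else chordLoopA w chordRootsA)
  = (let rootLen : Int := if PySem.Chars.slice w none (some 3) = ['S','o','l'] then 3 else 2
     if !(PySem.Set.contains chordRootSetB (PySem.Chars.slice w none (some rootLen))) then false
     else flatB (PySem.Chars.slice w (some rootLen) none)) := by
  rcases w with _ | ⟨x, _ | ⟨y, t⟩⟩
  · decide
  · rw [if_neg (by simp)]; exact case_one x
  · rw [if_neg (by simp)]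
    by_cases hSol : PySem.Chars.startswith (x :: y :: t) ['S','o','l'] = true
    · rw [PySem.Chars.startswith_iff] at hSol
      rcases t with _ | ⟨z, t2⟩
      · simp [List.cons_prefix_cons] at hSol
      obtain ⟨hx, hy, hz, -⟩ : 'S' = x ∧ 'o' = y ∧ 'l' = z ∧ True := by
        rcases List.cons_prefix_cons.mp hSol with ⟨h1, h2⟩
        rcases List.cons_prefix_cons.mp h2 with ⟨h3, h4⟩
        rcases List.cons_prefix_cons.mp h4 with ⟨h5, -⟩
        exact ⟨h1, h3, h5, trivial⟩
      subst hx; subst hy; subst hz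
      exact case_sol t2
    · by_cases hp0 : 'D' = x ∧ 'o' = y
      · obtain ⟨hx, hy⟩ := hp0; subst hx; subst hy; exact case_Do t
      by_cases hp1 : 'R' = x ∧ 'e' = y
      · obtain ⟨hx, hy⟩ := hp1; subst hx; subst hy; exact case_Re t
      by_cases hp2 : 'M' = x ∧ 'i' = y
      · obtain ⟨hx, hy⟩ := hp2; subst hx; subst hy; exact case_Mi t
      by_cases hp3 : 'F' = x ∧ 'a' = y
      · obtain ⟨hx, hy⟩ := hp3; subst hx; subst hy; exact case_Fa t
      by_cases hp4 : 'L' = x ∧ 'a' = y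
      · obtain ⟨hx, hy⟩ := hp4; subst hx; subst hy; exact case_La t
      by_cases hp5 : 'S' = x ∧ 'i' = y
      · obtain ⟨hx, hy⟩ := hp5; subst hx; subst hy; exact case_Si t
      exact case_none x y t hSol
        (fun ⟨h1, h2⟩ => hp0 ⟨h1.symm, h2.symm⟩) (fun ⟨h1, h2⟩ => hp1 ⟨h1.symm, h2.symm⟩)
        (fun ⟨h1, h2⟩ => hp2 ⟨h1.symm, h2.symm⟩) (fun ⟨h1, h2⟩ => hp3 ⟨h1.symm, h2.symm⟩)
        (fun ⟨h1, h2⟩ => hp4 ⟨h1.symm, h2.symm⟩) (fun ⟨h1, h2⟩ => hp5 ⟨h1.symm, h2.symm⟩)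

-- ===== VERDICT (by name: the statement is the Claim_ definition above) =====
theorem looks_like_italian_chord_py_spec : Claim_equal_looks_like_italian_chord_py := by
  intro word _
  unfold Spec_looks_like_italian_chord_py
  show (if PySem.Str.len word = 0 then false else chordLoopA word.toList chordRootsA)
      = looks_like_italian_chord_py_alt word
  have h := main_list word.toList
  simpa [PySem.Str.len_eq, looks_like_italian_chord_py_alt, flatB] using h
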